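-- pv_equiv track=rewrite | github.com/hustyuantao/TIMe | model/sequential_recommender/TIMe.py | find_sub_complex_sequence_index
-- ===== SOURCE A (Python) =====
-- def find_sub_complex_sequence_index(complex_sequence, query):
--     start_outer,start_inner,end_outer,end_inner = None,None,None,None
--     query_start,query_end = query[0],query[-1]
--     for i in range(len(complex_sequence)):
--         item_set = complex_sequence[i]
--         for j in range(len(item_set)):
--             item = item_set[j]
--             if item == query_start:
--                 start_outer = i
--                 start_inner = j
--             if item == query_end:
--                 end_outer = i
--                 end_inner = j
--                 return start_outer,start_inner,end_outer,end_inner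
-- ===== SOURCE B (Python) =====
-- def find_sub_complex_sequence_index(complex_sequence, query):
--     query_start, query_end = query[0], query[-1]
--     flat = [(i, j, x) for i, row in enumerate(complex_sequence) for j, x in enumerate(row)]
--     for k, (i, j, x) in enumerate(flat):
--         if x == query_end:
--             starts = [(si, sj) for si, sj, y in flat[:k + 1] if y == query_start]
--             if starts:
--                 return starts[-1][0], starts[-1][1], i, j
--             return None, None, i, j
--     return None
-- ===== Notes on version B (the rewrite author's own statement) =====
-- stated objective: alternative
-- what changed: A's single stateful nested loop (running last-start state, early return at the first end match) is replaced by building an enumerated flat (i,j,x) coordinate list once, scanning it for the first query_end and taking the last query_start from the prefix up to that point.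
-- outside the precondition, e.g. on find_sub_complex_sequence_index([[1]], [2]): A returns None, B returns None; on find_sub_complex_sequence_index([], [0]): A returns None, B returns None; on find_sub_complex_sequence_index([[1]], []): A raises IndexError, B raises IndexError
import Mathlib
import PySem

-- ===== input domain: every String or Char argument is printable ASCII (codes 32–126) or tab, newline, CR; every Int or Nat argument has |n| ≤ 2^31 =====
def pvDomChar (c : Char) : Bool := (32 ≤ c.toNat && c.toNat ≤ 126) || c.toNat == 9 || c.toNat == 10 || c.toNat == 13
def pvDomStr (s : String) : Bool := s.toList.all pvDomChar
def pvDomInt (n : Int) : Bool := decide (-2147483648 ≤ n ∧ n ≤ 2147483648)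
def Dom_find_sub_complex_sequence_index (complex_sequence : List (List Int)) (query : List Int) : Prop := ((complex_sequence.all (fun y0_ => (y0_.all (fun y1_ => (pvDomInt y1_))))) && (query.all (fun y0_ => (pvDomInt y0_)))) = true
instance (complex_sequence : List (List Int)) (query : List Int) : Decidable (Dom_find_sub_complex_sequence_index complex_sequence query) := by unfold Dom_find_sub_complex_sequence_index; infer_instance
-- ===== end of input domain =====

-- B replaces A's single stateful nested loop by building an enumerated flat coordinate list once,
-- locating the first query_end in it and taking the last query_start of the prefix (alternative
-- decomposition, same cost); return-value equivalence is proved on Pre_ (query nonempty, query_end present).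

-- ===== PORT A =====
-- inner loop: for j in range(len(item_set)) with early return; .inl = fell through with state, .inr = returned
def innerA (qs qe i : Int) : List Int → Int → (Option Int × Option Int) →
    (Option Int × Option Int) ⊕ (Option Int × Option Int × Option Int × Option Int)
  | [], _, st => .inl st
  | item :: rest, j, st =>
    let st' := if item = qs then (some i, some j) else st
    if item = qe then .inr (st'.1, st'.2, some i, some j)
    else innerA qs qe i rest (j + 1) st'

-- outer loop: for i in range(len(complex_sequence)); falling off the loop is Python's bare None (outside Pre_)
def outerA (qs qe : Int) : List (List Int) → Int → (Option Int × Option Int) →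
    Option Int × Option Int × Option Int × Option Int
  | [], _, _ => (none, none, none, none)
  | row :: rows, i, st =>
    match innerA qs qe i row 0 st with
    | .inr res => res
    | .inl st' => outerA qs qe rows (i + 1) st'

def find_sub_complex_sequence_index (complex_sequence : List (List Int)) (query : List Int) :
    Option Int × Option Int × Option Int × Option Int :=
  match PySem.List.pyGet? query 0, PySem.List.pyGet? query (-1) with
  | some qs, some qe => outerA qs qe complex_sequence 0 (none, none)
  | _, _ => (none, none, none, none)  -- query[0]/query[-1] raise IndexError (outside Pre_)

-- ===== PORT B =====
-- flat = [(i, j, x) for i, row in enumerate(complex_sequence) for j, x in enumerate(row)]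
def enumFlatB (complex_sequence : List (List Int)) : List (Int × Int × Int) :=
  (PySem.List.enumerate complex_sequence 0).flatMap
    (fun p => (PySem.List.enumerate p.2 0).map (fun q => (p.1, q.1, q.2)))

-- for k, (i, j, x) in enumerate(flat): if x == query_end: … ; falling off is Python's bare None (outside Pre_)
def findLoopB (qs qe : Int) (flat : List (Int × Int × Int)) :
    Nat → List (Int × Int × Int) → Option Int × Option Int × Option Int × Option Int
  | _, [] => (none, none, none, none)
  | k, (i, j, x) :: rest =>
    if x = qe then
      let starts := (PySem.List.slice flat none (some ((k : Int) + 1))).filterMap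
        (fun t => if t.2.2 = qs then some (t.1, t.2.1) else none)
      match starts.getLast? with
      | some (si, sj) => (some si, some sj, some i, some j)
      | none => (none, none, some i, some j)
    else findLoopB qs qe flat (k + 1) rest

def find_sub_complex_sequence_index_alt (complex_sequence : List (List Int)) (query : List Int) :
    Option Int × Option Int × Option Int × Option Int :=
  match PySem.List.pyGet? query 0 with
  | none => (none, none, none, none)  -- query[0] raises IndexError (outside Pre_)
  | some qs =>
    match PySem.List.pyGet? query (-1) with
    | none => (none, none, none, none)  -- query[-1] raises IndexError (outside Pre_)
    | some qe => findLoopB qs qe (enumFlatB complex_sequence) 0 (enumFlatB complex_sequence)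

-- ===== PRECONDITION & SPEC =====
-- Pre_ excludes the empty query, on which A raises IndexError, and inputs whose flattened sequence
-- does not contain query[-1], on which A returns bare None — not a value of the declared 4-tuple type.
def Pre_find_sub_complex_sequence_index (complex_sequence : List (List Int)) (query : List Int) : Prop :=
  ∃ x ∈ complex_sequence.flatten, query.getLast? = some x
instance (complex_sequence : List (List Int)) (query : List Int) : Decidable (Pre_find_sub_complex_sequence_index complex_sequence query) := by unfold Pre_find_sub_complex_sequence_index; infer_instance

def pvWitness_find_sub_complex_sequence_index : List (List Int) × List Int := ([[0, 1], [1, 0]], [1, 0])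

def Spec_find_sub_complex_sequence_index (complex_sequence : List (List Int)) (query : List Int) (out : Option Int × Option Int × Option Int × Option Int) : Prop := out = find_sub_complex_sequence_index_alt complex_sequence query
instance (complex_sequence : List (List Int)) (query : List Int) (out : Option Int × Option Int × Option Int × Option Int) : Decidable (Spec_find_sub_complex_sequence_index complex_sequence query out) := by unfold Spec_find_sub_complex_sequence_index; infer_instance

-- ===== CLAIM (what is proved, stated in full; the proofs are below) =====
def Claim_equal_find_sub_complex_sequence_index : Prop := ∀ (complex_sequence : List (List Int)) (query : List Int), Dom_find_sub_complex_sequence_index complex_sequence query → Pre_find_sub_complex_sequence_index complex_sequence query → Spec_find_sub_complex_sequence_index complex_sequence query (find_sub_complex_sequence_index complex_sequence query)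

-- ===== LEMMAS AND PROOFS =====

-- common intermediate: one pass over the flat coordinate list with A's running state
def procFlat (qs qe : Int) : List (Int × Int × Int) → (Option Int × Option Int) →
    Option Int × Option Int × Option Int × Option Int
  | [], _ => (none, none, none, none)
  | (i, j, x) :: rest, st =>
    let st' := if x = qs then (some i, some j) else st
    if x = qe then (st'.1, st'.2, some i, some j) else procFlat qs qe rest st'

def stOf (qs : Int) (l : List (Int × Int × Int)) (st : Option Int × Option Int) :
    Option Int × Option Int :=
  l.foldl (fun st t => if t.2.2 = qs then (some t.1, some t.2.1) else st) st

def startsOf (qs : Int) (l : List (Int × Int × Int)) : List (Int × Int) :=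
  l.filterMap (fun t => if t.2.2 = qs then some (t.1, t.2.1) else none)

theorem procFlat_innerA (qs qe i : Int) (row : List Int) :
    ∀ (j : Int) (st : Option Int × Option Int) (rest : List (Int × Int × Int)),
      procFlat qs qe (((PySem.List.enumerate row j).map (fun q => (i, q.1, q.2))) ++ rest) st =
        (match innerA qs qe i row j st with
         | .inr res => res
         | .inl st' => procFlat qs qe rest st') := by
  induction row with
  | nil => intro j st rest; simp [PySem.List.enumerate, innerA]
  | cons x r ih =>
    intro j st rest
    rw [PySem.List.enumerate_cons]
    simp only [List.map_cons, List.cons_append, procFlat, innerA]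
    by_cases hqe : x = qe <;> simp [hqe, ih]

theorem procFlat_outerA (qs qe : Int) (rows : List (List Int)) :
    ∀ (i : Int) (st : Option Int × Option Int),
      procFlat qs qe ((PySem.List.enumerate rows i).flatMap
          (fun p => (PySem.List.enumerate p.2 0).map (fun q => (p.1, q.1, q.2)))) st =
        outerA qs qe rows i st := by
  induction rows with
  | nil => intro i st; simp [PySem.List.enumerate, procFlat, outerA]
  | cons r rs ih =>
    intro i st
    rw [PySem.List.enumerate_cons]
    simp only [List.flatMap_cons, outerA]
    rw [procFlat_innerA]
    cases h : innerA qs qe i r 0 st with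
    | inr res => simp
    | inl st' => simp [ih]

theorem stOf_startsOf (qs : Int) (l : List (Int × Int × Int)) :
    ∀ st, stOf qs l st =
      (match (startsOf qs l).getLast? with
       | some p => (some p.1, some p.2)
       | none => st) := by
  induction l with
  | nil => intro st; rfl
  | cons t l ih =>
    intro st
    by_cases h : t.2.2 = qs
    · have hst : stOf qs (t :: l) st = stOf qs l (some t.1, some t.2.1) := by
        simp [stOf, h]
      have hstarts : startsOf qs (t :: l) = (t.1, t.2.1) :: startsOf qs l := by
        simp [startsOf, h]
      rw [hst, hstarts, ih]
      cases hg : (startsOf qs l).getLast? with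
      | some p => simp [List.getLast?_cons, hg]
      | none => simp [List.getLast?_cons, hg]
    · have hst : stOf qs (t :: l) st = stOf qs l st := by simp [stOf, h]
      have hstarts : startsOf qs (t :: l) = startsOf qs l := by simp [startsOf, h]
      rw [hst, hstarts, ih]

theorem findLoopB_procFlat (qs qe : Int) (flat : List (Int × Int × Int)) :
    ∀ (rest : List (Int × Int × Int)) (k : Nat),
      flat.drop k = rest →
      findLoopB qs qe flat k rest = procFlat qs qe rest (stOf qs (flat.take k) (none, none)) := by
  intro rest
  induction rest with
  | nil => intro k _; simp [findLoopB, procFlat]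
  | cons t rest ih =>
    intro k hdrop
    obtain ⟨i, j, x⟩ := t
    have hget : flat[k]? = some (i, j, x) := by
      rw [← List.head?_drop, hdrop]; rfl
    have htake : flat.take (k + 1) = flat.take k ++ [(i, j, x)] := by
      rw [List.take_add_one, hget]; rfl
    have hdrop' : flat.drop (k + 1) = rest := by
      have h2 := congrArg List.tail hdrop
      simpa using h2
    have hst : stOf qs (flat.take (k + 1)) (none, none) =
        (if x = qs then (some i, some j) else stOf qs (flat.take k) (none, none)) := by
      rw [htake]
      by_cases hqs : x = qs <;> simp [stOf, hqs]
    simp only [findLoopB, procFlat]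
    by_cases hqe : x = qe
    · subst hqe
      simp only [if_true]
      have hslice : PySem.List.slice flat none (some ((k : Int) + 1)) = flat.take (k + 1) := by
        have hc : ((k : Int) + 1) = ((k + 1 : Nat) : Int) := by push_cast; ring
        rw [hc, PySem.List.slice_to_natCast]
      rw [hslice,
        show List.filterMap (fun t => if t.2.2 = qs then some (t.1, t.2.1) else none)
            (flat.take (k + 1)) = startsOf qs (flat.take (k + 1)) from rfl]
      have hss := stOf_startsOf qs (flat.take (k + 1)) (none, none)
      cases hg : (startsOf qs (flat.take (k + 1))).getLast? with
      | some p =>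
        rw [hg] at hss
        obtain ⟨p1, p2⟩ := p
        have h3 : (if x = qs then (some i, some j)
            else stOf qs (flat.take k) (none, none)) = (some p1, some p2) := by
          rw [← hst, hss]
        rw [h3]
      | none =>
        rw [hg] at hss
        have h3 : (if x = qs then (some i, some j)
            else stOf qs (flat.take k) (none, none)) = ((none : Option Int), (none : Option Int)) := by
          rw [← hst, hss]
        rw [h3]
    · simp only [if_neg hqe]
      rw [ih (k + 1) hdrop', hst]

-- ===== VERDICT (by name: the statement is the Claim_ definition above) =====
theorem find_sub_complex_sequence_index_spec : Claim_equal_find_sub_complex_sequence_index := by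
  intro cs q _ _
  unfold Spec_find_sub_complex_sequence_index
  unfold find_sub_complex_sequence_index find_sub_complex_sequence_index_alt
  cases h0 : PySem.List.pyGet? q 0 with
  | none => rfl
  | some qs =>
    cases h1 : PySem.List.pyGet? q (-1) with
    | none => rfl
    | some qe =>
      show outerA qs qe cs 0 (none, none) = findLoopB qs qe (enumFlatB cs) 0 (enumFlatB cs)
      rw [findLoopB_procFlat qs qe (enumFlatB cs) (enumFlatB cs) 0 rfl]
      exact (procFlat_outerA qs qe cs 0 (none, none)).symm
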